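-- pv_equiv track=rewrite | github.com/rrajkumar77/TEKsystems_RAG_Langchain | JD_Resume_Final_User_Friendly_FIXED.py | parse_priority_skills
-- ===== SOURCE A (Python) =====
-- def parse_priority_skills(priority_input: str) -> list:
--     """Parse and normalize priority skills."""
--     if not priority_input:
--         return []
--     skills = []
--     for line in priority_input.split("\n"):
--         for skill in line.split(","):
--             skill = skill.strip()
--             if skill:
--                 skills.append(skill)
--     return skills
-- ===== SOURCE B (Python) =====
-- def parse_priority_skills(priority_input: str) -> list:
--     """Parse and normalize priority skills in one character-level pass."""
--     skills = []
--     cur = []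
--     for ch in priority_input:
--         if ch in ',\n':
--             t = ''.join(cur).strip()
--             if t:
--                 skills.append(t)
--             cur = []
--         else:
--             cur.append(ch)
--     t = ''.join(cur).strip()
--     if t:
--         skills.append(t)
--     return skills
-- ===== Notes on version B (the rewrite author's own statement) =====
-- stated objective: alternative
-- what changed: Replaces the two nested split() loops with a single character-level scan that accumulates the current token and flushes it (stripped, if non-empty) at each separator character; the explicit empty-input guard disappears.
import Mathlib
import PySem

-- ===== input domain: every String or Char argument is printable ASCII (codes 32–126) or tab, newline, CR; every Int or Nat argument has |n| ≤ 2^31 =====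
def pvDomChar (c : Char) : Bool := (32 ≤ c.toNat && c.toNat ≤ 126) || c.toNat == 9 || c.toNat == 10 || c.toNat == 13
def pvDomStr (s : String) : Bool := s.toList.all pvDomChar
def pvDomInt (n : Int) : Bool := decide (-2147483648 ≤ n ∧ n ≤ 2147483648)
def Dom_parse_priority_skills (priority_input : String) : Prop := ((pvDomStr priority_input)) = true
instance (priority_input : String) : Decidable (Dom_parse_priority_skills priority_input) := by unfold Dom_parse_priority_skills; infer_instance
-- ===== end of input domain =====

-- B replaces A's two nested split() loops by one character-level scan with an accumulator (objective: alternative).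

-- ===== PORT A =====
-- A: guard on empty string, then for each line of split("\n"), for each piece of split(","),
-- strip it and append it when non-empty.  Ported on the char-list side (PySem.Chars.splitOn = s.split(sep)).
def parse_priority_skills (priority_input : String) : List String :=
  if priority_input.toList = [] then []
  else
    ((PySem.Chars.splitOn priority_input.toList ['\n']).foldl (fun skills line =>
      (PySem.Chars.splitOn line [',']).foldl (fun skills skill =>
        if PySem.Chars.strip skill ≠ [] then skills ++ [PySem.Chars.strip skill] else skills)
        skills) []).map String.mk

-- ===== PORT B =====
-- B: one pass over the characters; state = (emitted skills, current token); a ',' or '\n'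
-- flushes the stripped current token if non-empty; a final flush after the loop.
def pvFlushB (st : List (List Char) × List Char) : List (List Char) :=
  if PySem.Chars.strip st.2 ≠ [] then st.1 ++ [PySem.Chars.strip st.2] else st.1

def pvStepB (st : List (List Char) × List Char) (ch : Char) : List (List Char) × List Char :=
  if ch = ',' ∨ ch = '\n' then (pvFlushB st, []) else (st.1, st.2 ++ [ch])

def parse_priority_skills_alt (priority_input : String) : List String :=
  (pvFlushB (priority_input.toList.foldl pvStepB ([], []))).map String.mk

-- ===== PRECONDITION & SPEC =====
def Spec_parse_priority_skills (priority_input : String) (out : List String) : Prop := out = parse_priority_skills_alt priority_input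
instance (priority_input : String) (out : List String) : Decidable (Spec_parse_priority_skills priority_input out) := by unfold Spec_parse_priority_skills; infer_instance

-- ===== CLAIM (what is proved, stated in full; the proofs are below) =====
def Claim_equal_parse_priority_skills : Prop := ∀ (priority_input : String), Dom_parse_priority_skills priority_input → Spec_parse_priority_skills priority_input (parse_priority_skills priority_input)

-- ===== LEMMAS AND PROOFS =====

-- proof-side single-character splitter (the meaning of s.split(c) for a one-char separator)
def pvSplit1 (d : Char) : List Char → List (List Char)
  | [] => [[]]
  | c :: rest =>
    if c = d then [] :: pvSplit1 d rest
    else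
      match pvSplit1 d rest with
      | [] => [[c]]
      | t :: ts => (c :: t) :: ts

-- proof-side splitter on both separators at once (the token stream B walks through)
def pvSplitAny : List Char → List (List Char)
  | [] => [[]]
  | c :: rest =>
    if c = ',' ∨ c = '\n' then [] :: pvSplitAny rest
    else
      match pvSplitAny rest with
      | [] => [[c]]
      | t :: ts => (c :: t) :: ts

def pvG (t : List Char) : Option (List Char) :=
  if PySem.Chars.strip t ≠ [] then some (PySem.Chars.strip t) else none

def pvConsHd (cur : List Char) : List (List Char) → List (List Char)
  | [] => [cur]
  | t :: ts => (cur ++ t) :: ts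

theorem pvSplit1_ne_nil (d : Char) (l : List Char) : pvSplit1 d l ≠ [] := by
  cases l with
  | nil => simp [pvSplit1]
  | cons c rest =>
    simp only [pvSplit1]
    split_ifs <;> [simp; skip]
    cases pvSplit1 d rest <;> simp

theorem pvSplitAny_ne_nil (l : List Char) : pvSplitAny l ≠ [] := by
  cases l with
  | nil => simp [pvSplitAny]
  | cons c rest =>
    simp only [pvSplitAny]
    split_ifs <;> [simp; skip]
    cases pvSplitAny rest <;> simp

theorem pv_go_spec (d : Char) (fuel : Nat) (l cur : List Char) (acc : List (List Char))
    (h : l.length ≤ fuel) :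
    PySem.Chars.splitOn.go [d] fuel l cur acc = acc.reverse ++ pvConsHd cur.reverse (pvSplit1 d l) := by
  induction fuel generalizing l cur acc with
  | zero =>
    have : l = [] := by cases l <;> simp_all
    subst this
    simp [PySem.Chars.splitOn.go, pvSplit1, pvConsHd]
  | succ f ih =>
    cases l with
    | nil => simp [PySem.Chars.splitOn.go, pvSplit1, pvConsHd]
    | cons c rest =>
      rw [PySem.Chars.splitOn.go]
      by_cases hc : c = d
      · subst hc
        have hp : List.isPrefixOf [c] (c :: rest) = true := by simp [List.isPrefixOf]
        rw [if_pos hp, show List.drop [c].length (c :: rest) = rest from rfl]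
        rw [ih rest [] (cur.reverse :: acc) (by simpa using Nat.le_of_succ_le_succ h)]
        have hne := pvSplit1_ne_nil c rest
        cases hrest : pvSplit1 c rest with
        | nil => exact absurd hrest hne
        | cons t ts => simp [pvSplit1, pvConsHd, hrest]
      · have hp : List.isPrefixOf [d] (c :: rest) = false := by
          simp [List.isPrefixOf]; exact fun hdc => absurd hdc.symm hc
        simp only [hp, Bool.false_eq_true, if_false]
        rw [ih rest (c :: cur) acc (by simpa using Nat.le_of_succ_le_succ h)]
        have := pvSplit1_ne_nil d rest
        cases hrest : pvSplit1 d rest with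
        | nil => exact absurd hrest this
        | cons t ts => simp [pvSplit1, pvConsHd, hrest, hc]

theorem pv_splitOn_eq (d : Char) (l : List Char) :
    PySem.Chars.splitOn l [d] = pvSplit1 d l := by
  rw [PySem.Chars.splitOn, pv_go_spec d (l.length + 1) l [] [] (by omega)]
  have := pvSplit1_ne_nil d l
  cases h : pvSplit1 d l with
  | nil => exact absurd h this
  | cons t ts => simp [pvConsHd]

theorem pv_splitAny_flat (cs : List Char) :
    (pvSplit1 '\n' cs).flatMap (pvSplit1 ',') = pvSplitAny cs := by
  induction cs with
  | nil => simp [pvSplit1, pvSplitAny]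
  | cons c rest ih =>
    by_cases hn : c = '\n'
    · subst hn
      simp [pvSplit1, pvSplitAny]
      simpa using ih
    · by_cases hcm : c = ','
      · subst hcm
        have := pvSplit1_ne_nil '\n' rest
        cases hrest : pvSplit1 '\n' rest with
        | nil => exact absurd hrest this
        | cons t ts =>
          simp only [pvSplit1, pvSplitAny, if_neg (by decide : ¬(',' : Char) = '\n'), hrest]
          rw [← ih, hrest]
          simp [pvSplit1, List.flatMap_cons]
      · have hne : ¬(c = ',' ∨ c = '\n') := by simp [hcm, hn]
        have := pvSplit1_ne_nil '\n' rest
        cases hrest : pvSplit1 '\n' rest with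
        | nil => exact absurd hrest this
        | cons t ts =>
          have := pvSplit1_ne_nil ',' t
          cases ht : pvSplit1 ',' t with
          | nil => exact absurd ht this
          | cons u us =>
            have ihr : pvSplit1 ',' t ++ ts.flatMap (pvSplit1 ',') = pvSplitAny rest := by
              rw [← ih, hrest]; simp [List.flatMap_cons]
            simp only [pvSplit1, pvSplitAny, if_neg hn, if_neg hne, hrest]
            rw [← ihr, ht]
            simp [pvSplit1, List.flatMap_cons, ht, hcm]

theorem pv_inner_foldl (ts : List (List Char)) (acc : List (List Char)) :
    ts.foldl (fun skills skill =>
        if PySem.Chars.strip skill ≠ [] then skills ++ [PySem.Chars.strip skill] else skills) acc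
      = acc ++ ts.filterMap pvG := by
  induction ts generalizing acc with
  | nil => simp
  | cons t ts ih =>
    simp only [List.foldl_cons, List.filterMap_cons, ih, pvG]
    split_ifs <;> simp

theorem pv_filterMap_flatMap (ls : List (List Char)) :
    (ls.flatMap (pvSplit1 ',')).filterMap pvG
      = ls.flatMap (fun l => (pvSplit1 ',' l).filterMap pvG) := by
  induction ls with
  | nil => simp
  | cons l ls ih => simp [List.flatMap_cons, List.filterMap_append, ih]

theorem pv_foldB (cs : List Char) (sk : List (List Char)) (cur : List Char) :
    pvFlushB (cs.foldl pvStepB (sk, cur))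
      = sk ++ (pvConsHd cur (pvSplitAny cs)).filterMap pvG := by
  induction cs generalizing sk cur with
  | nil =>
    simp only [List.foldl_nil, pvSplitAny, pvConsHd, List.append_nil, List.filterMap, pvG,
      pvFlushB]
    split_ifs <;> simp
  | cons c rest ih =>
    by_cases hc : c = ',' ∨ c = '\n'
    · simp only [List.foldl_cons, pvStepB, if_pos hc]
      rw [ih]
      have := pvSplitAny_ne_nil rest
      cases hrest : pvSplitAny rest with
      | nil => exact absurd hrest this
      | cons t ts =>
        simp only [pvSplitAny, if_pos hc, hrest, pvConsHd, List.nil_append, List.append_nil,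
          List.filterMap_cons, pvG, pvFlushB]
        split_ifs <;> simp
    · simp only [List.foldl_cons, pvStepB, if_neg hc]
      rw [ih]
      have := pvSplitAny_ne_nil rest
      cases hrest : pvSplitAny rest with
      | nil => exact absurd hrest this
      | cons t ts =>
        simp [pvSplitAny, if_neg hc, hrest, pvConsHd, List.append_assoc]

-- ===== VERDICT (by name: the statement is the Claim_ definition above) =====
theorem parse_priority_skills_spec : Claim_equal_parse_priority_skills := by
  intro s _
  unfold Spec_parse_priority_skills parse_priority_skills parse_priority_skills_alt
  rw [pv_foldB s.toList [] []]
  have hB : (pvConsHd [] (pvSplitAny s.toList)).filterMap pvG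
      = (pvSplitAny s.toList).filterMap pvG := by
    have := pvSplitAny_ne_nil s.toList
    cases h : pvSplitAny s.toList with
    | nil => exact absurd h this
    | cons t ts => simp [pvConsHd]
  rw [hB]
  by_cases hs : s.toList = []
  · rw [if_pos hs, hs]
    simp [pvSplitAny, List.filterMap, pvG, PySem.Chars.strip, PySem.Chars.lstrip, PySem.Chars.rstrip]
  · rw [if_neg hs]
    rw [pv_splitOn_eq '\n' s.toList]
    have houter : (pvSplit1 '\n' s.toList).foldl (fun skills line =>
        (PySem.Chars.splitOn line [',']).foldl (fun skills skill =>
          if PySem.Chars.strip skill ≠ [] then skills ++ [PySem.Chars.strip skill] else skills)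
          skills) []
        = (pvSplit1 '\n' s.toList).flatMap (fun l => (pvSplit1 ',' l).filterMap pvG) := by
      have : ∀ line skills, (PySem.Chars.splitOn line [',']).foldl (fun skills skill =>
          if PySem.Chars.strip skill ≠ [] then skills ++ [PySem.Chars.strip skill] else skills)
          skills = skills ++ (pvSplit1 ',' line).filterMap pvG := by
        intro line skills
        rw [pv_splitOn_eq ',' line, pv_inner_foldl]
      calc (pvSplit1 '\n' s.toList).foldl _ []
          = (pvSplit1 '\n' s.toList).foldl
              (fun skills line => skills ++ (pvSplit1 ',' line).filterMap pvG) [] := by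
            exact PySem.List.foldl_congr_mem _ _ _ _ (fun acc line _ => this line acc)
        _ = _ := by
            simpa using PySem.List.foldl_append_eq_flatMap
              (fun l => (pvSplit1 ',' l).filterMap pvG) (pvSplit1 '\n' s.toList) []
    rw [houter, ← pv_filterMap_flatMap, pv_splitAny_flat]
    simp
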